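-- pv_equiv track=rewrite | github.com/kangliqiang/deemon | deep-modeling/api/typeinfalg/semantic_inference.py | infer_semantic_type
-- ===== SOURCE A (Python) =====
-- SEM_TYPE_USER_UNIQUE = 0
--
-- SEM_TYPE_SESSION_UNIQUE = 1  # Value once per user
--
-- SEM_TYPE_CONSTANT = 2  # All values are equal, for all users
--
-- SEM_TYPE_UNCERTAIN = 3  # Anything else
--
-- def infer_semantic_type(tuples):
--     if len(tuples) == 0:
--         return SEM_TYPE_UNCERTAIN
--
--     first_val = tuples[0]["value"]
--     values_per_user = {}
--     permitted_duplicates = 0 # for user unique a value might occur multiple times with the same user key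
--     all_values = set()
--     constant = True
--     for item in tuples:
--         val = item["value"]
--         user_key = item["user"]
--
--         # Check whether the value is constant
--         if val != first_val:
--             constant = False
--
--         # User unique
--         if user_key not in values_per_user:
--             values_per_user[user_key] = set()
--
--         if val not in all_values:
--             values_per_user[user_key].add(val)
--         elif val in values_per_user[user_key]:
--             permitted_duplicates += 1
--
--         # Session unique
--         all_values.add(val)
--
--     # When constant, it cannot be unique in any way
--     if constant:
--         return SEM_TYPE_CONSTANT
--
--     # Everything that is session unique is also user unique, therefore this
--     # has to be checked first
--     if len(all_values) == len(tuples):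
--         return SEM_TYPE_SESSION_UNIQUE
--
--     # If it is user unique (occurs at least two time for one user)
--     if len(all_values) + permitted_duplicates == len(tuples):
--         return SEM_TYPE_USER_UNIQUE
--
--     # Example for uncertain case: (user1, a), (user1, b), (user2, b)
--     return SEM_TYPE_UNCERTAIN
-- ===== SOURCE B (Python) =====
-- SEM_TYPE_USER_UNIQUE = 0
--
-- SEM_TYPE_SESSION_UNIQUE = 1  # Value once per user
--
-- SEM_TYPE_CONSTANT = 2  # All values are equal, for all users
--
-- SEM_TYPE_UNCERTAIN = 3  # Anything else
--
-- def infer_semantic_type(tuples):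
--     if len(tuples) == 0:
--         return SEM_TYPE_UNCERTAIN
--
--     # One pass: group the users of each value.
--     users_of = {}
--     for item in tuples:
--         users_of.setdefault(item["value"], set()).add(item["user"])
--
--     if len(users_of) == 1:
--         return SEM_TYPE_CONSTANT
--     if len(users_of) == len(tuples):
--         return SEM_TYPE_SESSION_UNIQUE
--     if all(len(users) == 1 for users in users_of.values()):
--         return SEM_TYPE_USER_UNIQUE
--     return SEM_TYPE_UNCERTAIN
-- ===== Notes on version B (the rewrite author's own statement) =====
-- stated objective: simpler
-- what changed: A's four parallel loop accumulators (per-user value sets, a permitted-duplicates counter, the set of all values, a constant flag) are replaced by a single one-pass value-to-users grouping dict, and the category is decided from its aggregates (one distinct value = CONSTANT, as many distinct values as tuples = SESSION_UNIQUE, every value owned by exactly one user = USER_UNIQUE).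
import Mathlib
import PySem

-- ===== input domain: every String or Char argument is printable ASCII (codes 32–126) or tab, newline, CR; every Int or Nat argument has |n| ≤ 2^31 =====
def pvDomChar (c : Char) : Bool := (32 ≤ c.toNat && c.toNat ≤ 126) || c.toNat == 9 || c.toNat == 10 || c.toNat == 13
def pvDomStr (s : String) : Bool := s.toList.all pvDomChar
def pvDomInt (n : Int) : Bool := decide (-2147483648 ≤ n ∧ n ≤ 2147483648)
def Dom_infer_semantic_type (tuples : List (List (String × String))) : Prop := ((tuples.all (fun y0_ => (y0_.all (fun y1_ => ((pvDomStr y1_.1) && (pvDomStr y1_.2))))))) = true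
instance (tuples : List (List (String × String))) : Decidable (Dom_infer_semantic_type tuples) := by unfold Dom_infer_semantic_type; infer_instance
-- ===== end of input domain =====

-- B replaces A's four parallel loop accumulators (per-user value sets, a permitted-duplicates
-- counter, the set of all values, a constant flag) by one value→users grouping dict and decides
-- from its aggregates; objective: simpler.  Equivalence is proved on inputs whose items all carry
-- the "value" and "user" keys (elsewhere the Python A raises KeyError).

-- ===== PORT A =====
-- loop state: values_per_user, permitted_duplicates, all_values, constant
structure AState where
  vpu : PySem.Dict String (PySem.Set String)
  permitted : Int
  allValues : PySem.Set String
  constant : Bool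

-- the body of A's for-loop (item["k"] = first-match lookup; the .getD "" default is unreachable
-- under Pre_; values_per_user[user_key].add(val) is Dict.modify at a key that is present)
def pvStepA (first_val : String) (st : AState) (item : List (String × String)) : AState :=
  let val := (item.lookup "value").getD ""
  let user_key := (item.lookup "user").getD ""
  let constant := if val != first_val then false else st.constant
  let vpu := if !(st.vpu.contains user_key) then st.vpu.insert user_key PySem.Set.empty else st.vpu
  let pr :=
    if !(PySem.Set.contains st.allValues val) then
      (vpu.modify user_key PySem.Set.empty (fun s => PySem.Set.add s val), st.permitted)
    else if PySem.Set.contains (vpu.getD user_key PySem.Set.empty) val then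
      (vpu, st.permitted + 1)
    else (vpu, st.permitted)
  { vpu := pr.1, permitted := pr.2, allValues := PySem.Set.add st.allValues val, constant := constant }

def infer_semantic_type (tuples : List (List (String × String))) : Int :=
  if tuples.length = 0 then 3
  else
    let first_val := (((PySem.List.pyGet? tuples 0).getD []).lookup "value").getD ""
    let st := tuples.foldl (pvStepA first_val) ⟨PySem.Dict.empty, 0, PySem.Set.empty, true⟩
    if st.constant then 2
    else if PySem.Set.len st.allValues = (tuples.length : Int) then 1
    else if PySem.Set.len st.allValues + st.permitted = (tuples.length : Int) then 0
    else 3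

-- ===== PORT B =====
-- users_of.setdefault(item["value"], set()).add(item["user"])  =  Dict.modify with default set()
def infer_semantic_type_alt (tuples : List (List (String × String))) : Int :=
  if tuples.length = 0 then 3
  else
    let users_of := tuples.foldl
      (fun (d : PySem.Dict String (PySem.Set String)) item =>
        d.modify ((item.lookup "value").getD "") PySem.Set.empty
          (fun s => PySem.Set.add s ((item.lookup "user").getD "")))
      PySem.Dict.empty
    if users_of.size = 1 then 2
    else if users_of.size = tuples.length then 1
    else if users_of.values.all (fun users => PySem.Set.len users == 1) then 0
    else 3

-- ===== PRECONDITION & SPEC =====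
-- Pre_ excludes exactly the inputs where Python A raises KeyError: some item lacks a
-- "value" or a "user" key.
def Pre_infer_semantic_type (tuples : List (List (String × String))) : Prop :=
  ∀ item ∈ tuples, (item.lookup "value").isSome = true ∧ (item.lookup "user").isSome = true
instance (tuples : List (List (String × String))) : Decidable (Pre_infer_semantic_type tuples) := by
  unfold Pre_infer_semantic_type; infer_instance

def pvWitness_infer_semantic_type : (List (List (String × String))) :=
  [[("value", "a"), ("user", "u")], [("value", "b"), ("user", "v")]]

def Spec_infer_semantic_type (tuples : List (List (String × String))) (out : Int) : Prop := out = infer_semantic_type_alt tuples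
instance (tuples : List (List (String × String))) (out : Int) : Decidable (Spec_infer_semantic_type tuples out) := by unfold Spec_infer_semantic_type; infer_instance

-- ===== CLAIM (what is proved, stated in full; the proofs are below) =====
def Claim_equal_infer_semantic_type : Prop := ∀ (tuples : List (List (String × String))), Dom_infer_semantic_type tuples → Pre_infer_semantic_type tuples → Spec_infer_semantic_type tuples (infer_semantic_type tuples)

-- ===== LEMMAS AND PROOFS =====

-- the (value, user) pair an item contributes
def pvPair (item : List (String × String)) : String × String :=
  ((item.lookup "value").getD "", (item.lookup "user").getD "")

-- the user of the FIRST occurrence of value v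
def pvFu (p : List (String × String)) (v : String) : Option String :=
  (p.find? (fun q => q.1 == v)).map Prod.snd

-- every occurrence's user is the first user of its value
def pvGood (p : List (String × String)) : Prop := ∀ q ∈ p, pvFu p q.1 = some q.2

-- pair-level version of A's loop body
def pvStep (f : String) (st : AState) (x : String × String) : AState :=
  let constant := if x.1 != f then false else st.constant
  let vpu := if !(st.vpu.contains x.2) then st.vpu.insert x.2 PySem.Set.empty else st.vpu
  let pr :=
    if !(PySem.Set.contains st.allValues x.1) then
      (vpu.modify x.2 PySem.Set.empty (fun s => PySem.Set.add s x.1), st.permitted)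
    else if PySem.Set.contains (vpu.getD x.2 PySem.Set.empty) x.1 then
      (vpu, st.permitted + 1)
    else (vpu, st.permitted)
  { vpu := pr.1, permitted := pr.2, allValues := PySem.Set.add st.allValues x.1, constant := constant }

-- the invariant of A's loop after processing q
def pvInvA (f : String) (q : List (String × String)) (st : AState) : Prop :=
  st.allValues = PySem.Set.ofList (q.map Prod.fst) ∧
  st.constant = q.all (fun x => x.1 == f) ∧
  (∀ u v, (PySem.Set.contains (st.vpu.getD u PySem.Set.empty) v = true) ↔ pvFu q v = some u) ∧
  ∃ b : Nat, st.permitted = (q.length : Int) - ((PySem.Set.ofList (q.map Prod.fst)).length : Int) - b ∧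
    (b = 0 ↔ pvGood q)

theorem pvFu_append_of_mem (q r : List (String × String)) (v : String)
    (h : v ∈ q.map Prod.fst) : pvFu (q ++ r) v = pvFu q v := by
  unfold pvFu
  rw [List.find?_append]
  obtain ⟨x, hx, hv⟩ := List.mem_map.1 h
  have : (q.find? (fun q => q.1 == v)).isSome = true :=
    List.find?_isSome.2 ⟨x, hx, by simp [hv]⟩
  obtain ⟨r, hr⟩ := Option.isSome_iff_exists.1 this
  simp [hr]

theorem pvFu_of_not_mem (q : List (String × String)) (v : String)
    (h : v ∉ q.map Prod.fst) : pvFu q v = none := by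
  unfold pvFu
  rw [List.find?_eq_none.2]
  · rfl
  · intro x hx hb
    exact h (List.mem_map.2 ⟨x, hx, by simpa using hb.symm⟩)

theorem pvFu_append_single_of_not_mem (q : List (String × String)) (x : String × String) (v : String)
    (h : v ∉ q.map Prod.fst) :
    pvFu (q ++ [x]) v = if x.1 == v then some x.2 else none := by
  unfold pvFu
  rw [List.find?_append]
  have hn : q.find? (fun q => q.1 == v) = none := by
    rw [List.find?_eq_none]
    intro x hx hb
    exact h (List.mem_map.2 ⟨x, hx, by simpa using hb.symm⟩)
  by_cases hx : x.1 == v <;> simp [hn, hx]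

theorem pvFu_isSome_of_mem (q : List (String × String)) (v : String)
    (h : v ∈ q.map Prod.fst) : (pvFu q v).isSome = true := by
  unfold pvFu
  obtain ⟨x, hx, hv⟩ := List.mem_map.1 h
  simp only [Option.isSome_map]
  exact List.find?_isSome.2 ⟨x, hx, by simp [hv]⟩

theorem pvGood_append_single (q : List (String × String)) (x : String × String) :
    pvGood (q ++ [x]) ↔ pvGood q ∧ pvFu (q ++ [x]) x.1 = some x.2 := by
  constructor
  · intro h
    refine ⟨fun qi hqi => ?_, h x (by simp)⟩
    have := h qi (List.mem_append_left _ hqi)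
    rwa [pvFu_append_of_mem q [x] qi.1 (List.mem_map_of_mem hqi)] at this
  · rintro ⟨h1, h2⟩ qi hqi
    rcases List.mem_append.1 hqi with hq | hq
    · rw [pvFu_append_of_mem q [x] qi.1 (List.mem_map_of_mem hq)]
      exact h1 qi hq
    · simp only [List.mem_singleton] at hq
      subst hq
      exact h2

theorem pvGetD_guard (d : PySem.Dict String (PySem.Set String)) (u k : String) :
    (if !(d.contains u) then d.insert u PySem.Set.empty else d).getD k PySem.Set.empty
      = d.getD k PySem.Set.empty := by
  by_cases hc : d.contains u
  · simp [hc]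
  · simp only [Bool.eq_false_iff.2 hc, Bool.not_false, if_true]
    rw [PySem.Dict.getD_insert]
    split_ifs with hk
    · subst hk
      rw [PySem.Dict.getD_of_not_contains _ _ (Bool.eq_false_iff.2 hc)]
    · rfl

theorem pvOfList_append_single (l : List String) (v : String) :
    PySem.Set.ofList (l ++ [v]) = PySem.Set.add (PySem.Set.ofList l) v := by
  simp [PySem.Set.ofList_eq_foldl, List.foldl_append]

theorem pvAdd_of_mem (s : PySem.Set String) (v : String) (h : v ∈ s) :
    PySem.Set.add s v = s := by
  simp [PySem.Set.add, PySem.Set.contains, h]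

theorem pvLen_add_of_not_mem (s : PySem.Set String) (v : String) (h : v ∉ s) :
    (PySem.Set.add s v).length = s.length + 1 := by
  have : s.contains v = false := by
    rw [Bool.eq_false_iff]
    intro hc
    exact h (List.contains_iff_mem.1 hc)
  simp [PySem.Set.add, h]

theorem pvInvA_step (f : String) (q : List (String × String)) (st : AState) (x : String × String)
    (h : pvInvA f q st) : pvInvA f (q ++ [x]) (pvStep f st x) := by
  obtain ⟨vpu, perm, av, c⟩ := st
  obtain ⟨hA, hC, hV, b, hP, hG⟩ := h
  simp only at hA hC hV hP
  have hGuard := pvGetD_guard vpu x.2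
  have hGuard' : ∀ k, (if vpu.contains x.2 = false then vpu.insert x.2 ([] : PySem.Set String)
      else vpu).getD k ([] : PySem.Set String) = vpu.getD k ([] : PySem.Set String) := by
    intro k
    have h0 : (if vpu.contains x.2 = false then vpu.insert x.2 ([] : PySem.Set String) else vpu)
        = (if !(vpu.contains x.2) then vpu.insert x.2 PySem.Set.empty else vpu) := by
      cases hcb : vpu.contains x.2 <;> simp [PySem.Set.empty]
    rw [h0]
    exact hGuard k
  have hC' : (if x.1 != f then false else c) = (q ++ [x]).all (fun y => y.1 == f) := by
    cases hf : x.1 == f <;> simp [List.all_append, bne, hf, hC]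
  have hAv : PySem.Set.contains av x.1 = true ↔ x.1 ∈ q.map Prod.fst := by
    rw [hA]
    simp [PySem.Set.contains, PySem.Set.mem_ofList]
  have hMapApp : (q ++ [x]).map Prod.fst = q.map Prod.fst ++ [x.1] := by simp
  have hLen : ((q ++ [x]).length : Int) = (q.length : Int) + 1 := by simp
  by_cases hmem : x.1 ∈ q.map Prod.fst
  · -- x.1 already seen
    have hcav : PySem.Set.contains av x.1 = true := hAv.2 hmem
    have hV' : ∀ u v, (PySem.Set.contains (vpu.getD u PySem.Set.empty) v = true) ↔
        pvFu (q ++ [x]) v = some u := by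
      intro u v
      by_cases hv : v ∈ q.map Prod.fst
      · rw [pvFu_append_of_mem q [x] v hv]
        exact hV u v
      · rw [pvFu_append_single_of_not_mem q x v hv]
        have hx1 : (x.1 == v) = false := by
          cases hb : x.1 == v
          · rfl
          · exact absurd (eq_of_beq hb ▸ hmem) hv
        rw [hx1]
        constructor
        · intro hcont
          have h2 := (hV u v).1 hcont
          rw [pvFu_of_not_mem q v hv] at h2
          exact absurd h2 (by simp)
        · intro hnone
          simp at hnone
    have hdist : PySem.Set.ofList ((q ++ [x]).map Prod.fst) = PySem.Set.ofList (q.map Prod.fst) := by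
      rw [hMapApp, pvOfList_append_single]
      exact pvAdd_of_mem _ _ ((PySem.Set.mem_ofList _ _).2 hmem)
    have hAv' : PySem.Set.add av x.1 = PySem.Set.ofList ((q ++ [x]).map Prod.fst) := by
      rw [hdist, hA]
      exact pvAdd_of_mem _ _ ((PySem.Set.mem_ofList _ _).2 hmem)
    have hfuq : pvFu (q ++ [x]) x.1 = pvFu q x.1 := pvFu_append_of_mem q [x] x.1 hmem
    by_cases hdup : PySem.Set.contains (vpu.getD x.2 PySem.Set.empty) x.1 = true
    · -- permitted duplicate: same user again
      have hm1 : x.1 ∈ av := List.contains_iff_mem.1 hcav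
      have hm2 : x.1 ∈ (if vpu.contains x.2 = false then vpu.insert x.2 ([] : PySem.Set String)
          else vpu).getD x.2 ([] : PySem.Set String) := by
        rw [hGuard' x.2]
        exact List.contains_iff_mem.1 hdup
      have hstate : pvStep f ⟨vpu, perm, av, c⟩ x =
          ⟨if !(vpu.contains x.2) then vpu.insert x.2 PySem.Set.empty else vpu, perm + 1,
            PySem.Set.add av x.1, if x.1 != f then false else c⟩ := by
        simp [pvStep, hm1, hm2, PySem.Set.empty]
      rw [hstate]
      refine ⟨hAv', hC', ?_, b, ?_, ?_⟩
      · intro u v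
        simp only
        rw [hGuard u]
        exact hV' u v
      · simp only [hdist, hLen]
        omega
      · rw [hG, pvGood_append_single]
        have : pvFu (q ++ [x]) x.1 = some x.2 := by
          rw [hfuq]
          exact (hV x.2 x.1).1 hdup
        simp [this]
    · -- duplicate by another user
      have hdupf : PySem.Set.contains (vpu.getD x.2 PySem.Set.empty) x.1 = false :=
        Bool.eq_false_iff.2 hdup
      have hm1 : x.1 ∈ av := List.contains_iff_mem.1 hcav
      have hm2f : x.1 ∉ (if vpu.contains x.2 = false then vpu.insert x.2 ([] : PySem.Set String)
          else vpu).getD x.2 ([] : PySem.Set String) := by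
        rw [hGuard' x.2]
        intro hm
        exact Bool.eq_false_iff.1 hdupf (List.contains_iff_mem.2 hm)
      have hstate : pvStep f ⟨vpu, perm, av, c⟩ x =
          ⟨if !(vpu.contains x.2) then vpu.insert x.2 PySem.Set.empty else vpu, perm,
            PySem.Set.add av x.1, if x.1 != f then false else c⟩ := by
        simp [pvStep, hm1, hm2f, PySem.Set.empty]
      rw [hstate]
      refine ⟨hAv', hC', ?_, b + 1, ?_, ?_⟩
      · intro u v
        simp only
        rw [hGuard u]
        exact hV' u v
      · simp only [hdist, hLen]
        omega
      · constructor
        · intro hb1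
          exact absurd hb1 (by omega)
        · intro hgood
          rw [pvGood_append_single] at hgood
          have h2 := hgood.2
          rw [hfuq] at h2
          have h3 := (hV x.2 x.1).2 h2
          rw [hdupf] at h3
          simp at h3
  · -- x.1 is new
    have hcav : PySem.Set.contains av x.1 = false := by
      cases hb : PySem.Set.contains av x.1
      · rfl
      · exact absurd (hAv.1 hb) hmem
    have hfux : pvFu (q ++ [x]) x.1 = some x.2 := by
      rw [pvFu_append_single_of_not_mem q x x.1 hmem]
      simp
    have hm1f : x.1 ∉ av := by
      intro hm
      exact Bool.eq_false_iff.1 hcav (List.contains_iff_mem.2 hm)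
    have hstate : pvStep f ⟨vpu, perm, av, c⟩ x =
        ⟨(if !(vpu.contains x.2) then vpu.insert x.2 PySem.Set.empty else vpu).modify x.2
            PySem.Set.empty (fun s => PySem.Set.add s x.1), perm,
          PySem.Set.add av x.1, if x.1 != f then false else c⟩ := by
      simp [pvStep, hm1f, PySem.Set.empty]
    rw [hstate]
    have hnotm : x.1 ∉ PySem.Set.ofList (q.map Prod.fst) := fun hm =>
      hmem ((PySem.Set.mem_ofList _ _).1 hm)
    refine ⟨?_, hC', ?_, b, ?_, ?_⟩
    · simp only
      rw [hMapApp, pvOfList_append_single, hA]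
    · intro u v
      simp only
      rw [PySem.Dict.getD_modify, hGuard x.2, hGuard u]
      by_cases hv : v ∈ q.map Prod.fst
      · rw [pvFu_append_of_mem q [x] v hv]
        by_cases hu : u = x.2
        · rw [if_pos hu]
          subst hu
          constructor
          · intro hcont
            rcases (PySem.Set.mem_add _ _ _).1 (List.contains_iff_mem.1 hcont) with hm | hm
            · exact (hV x.2 v).1 (List.contains_iff_mem.2 hm)
            · exact absurd (hm ▸ hv) hmem
          · intro hfu
            have h2 := (hV x.2 v).2 hfu
            exact List.contains_iff_mem.2
              ((PySem.Set.mem_add _ _ _).2 (Or.inl (List.contains_iff_mem.1 h2)))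
        · rw [if_neg hu]
          exact hV u v
      · rw [pvFu_append_single_of_not_mem q x v hv]
        have hnone : pvFu q v = none := pvFu_of_not_mem q v hv
        have hold : PySem.Set.contains (vpu.getD u PySem.Set.empty) v = false := by
          cases hb2 : PySem.Set.contains (vpu.getD u PySem.Set.empty) v
          · rfl
          · exact absurd ((hV u v).1 hb2) (by simp [hnone])
        by_cases hu : u = x.2
        · rw [if_pos hu]
          subst hu
          constructor
          · intro hcont
            rcases (PySem.Set.mem_add _ _ _).1 (List.contains_iff_mem.1 hcont) with hm | hm
            · exact absurd (List.contains_iff_mem.2 hm) (Bool.eq_false_iff.1 hold)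
            · subst hm
              simp
          · intro hif
            by_cases hb2 : (x.1 == v) = true
            · have hveq : v = x.1 := (eq_of_beq hb2).symm
              subst hveq
              exact List.contains_iff_mem.2 ((PySem.Set.mem_add _ _ _).2 (Or.inr rfl))
            · rw [Bool.eq_false_iff.2 hb2] at hif
              simp at hif
        · rw [if_neg hu, hold]
          constructor
          · intro hf1
            exact absurd hf1 (by simp)
          · intro hif
            by_cases hb2 : (x.1 == v) = true
            · rw [hb2] at hif
              simp at hif
              exact absurd hif.symm hu
            · rw [Bool.eq_false_iff.2 hb2] at hif
              simp at hif
    · simp only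
      rw [hMapApp, pvOfList_append_single, pvLen_add_of_not_mem _ _ hnotm, hLen]
      push_cast
      omega
    · rw [hG, pvGood_append_single]
      simp [hfux]

theorem pvInvA_foldl (f : String) (r q : List (String × String)) (st : AState)
    (h : pvInvA f q st) : pvInvA f (q ++ r) (r.foldl (pvStep f) st) := by
  induction r generalizing q st with
  | nil => simpa using h
  | cons x r ih =>
      have := ih (q ++ [x]) (pvStep f st x) (pvInvA_step f q st x h)
      simpa using this

-- pair-level version of B's loop body
def pvStepB (d : PySem.Dict String (PySem.Set String)) (x : String × String) :
    PySem.Dict String (PySem.Set String) :=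
  d.modify x.1 PySem.Set.empty (fun s => PySem.Set.add s x.2)

theorem pvDB_keys (p : List (String × String)) :
    (p.foldl pvStepB PySem.Dict.empty).keys = PySem.Set.ofList (p.map Prod.fst) := by
  unfold pvStepB
  rw [PySem.Dict.keys_foldl_modify_key p Prod.fst PySem.Set.empty
    (fun _ x => fun s => PySem.Set.add s x.2)]
  simp [PySem.Set.update, PySem.Set.ofList_eq_foldl]

theorem pvDB_nodup_keys (p : List (String × String)) :
    (p.foldl pvStepB PySem.Dict.empty).keys.Nodup := by
  unfold pvStepB
  exact PySem.Dict.nodup_keys_foldl_modify_key p Prod.fst PySem.Set.empty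
    (fun _ x => fun s => PySem.Set.add s x.2) PySem.Dict.empty (by simp)

theorem pvDB_getD (p : List (String × String)) (d : PySem.Dict String (PySem.Set String)) (v : String) :
    (p.foldl pvStepB d).getD v PySem.Set.empty =
      PySem.Set.update (d.getD v PySem.Set.empty) ((p.filter (fun q => q.1 == v)).map Prod.snd) := by
  induction p generalizing d with
  | nil => simp [PySem.Set.update]
  | cons x p ih =>
      rw [List.foldl_cons, ih]
      by_cases hb : (x.1 == v) = true
      · have hv : v = x.1 := (eq_of_beq hb).symm
        subst hv
        simp only [pvStepB, List.filter_cons, hb, if_true, List.map_cons]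
        rw [PySem.Dict.getD_modify, if_pos rfl]
        simp [PySem.Set.update]
      · simp only [pvStepB, List.filter_cons, hb]
        rw [PySem.Dict.getD_modify, if_neg (fun hv => by simp [hv] at hb)]
        simp

theorem pvOfList_length_one_iff (l : List String) :
    (PySem.Set.ofList l).length = 1 ↔ l ≠ [] ∧ ∀ a ∈ l, ∀ b ∈ l, a = b := by
  constructor
  · intro h
    obtain ⟨a, ha⟩ := List.length_eq_one_iff.1 h
    have hmem : ∀ c ∈ l, c = a := by
      intro c hc
      have h2 : c ∈ PySem.Set.ofList l := (PySem.Set.mem_ofList _ _).2 hc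
      rw [ha] at h2
      simpa using h2
    have hne : l ≠ [] := by
      intro hnil
      rw [hnil] at ha
      simp [PySem.Set.ofList] at ha
    exact ⟨hne, fun c hc b hb => (hmem c hc).trans (hmem b hb).symm⟩
  · rintro ⟨hne, hall⟩
    obtain ⟨c, cs, rfl⟩ := List.exists_cons_of_ne_nil hne
    have hconst : PySem.Set.ofList (c :: cs) = [c] := by
      have h0 : PySem.Set.ofList (c :: cs) = cs.foldl PySem.Set.add [c] := by
        rw [PySem.Set.ofList_eq_foldl]
        rfl
      rw [h0]
      have : ∀ a ∈ cs, a = c := fun a ha => hall a (by simp [ha]) c (by simp)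
      clear hall hne h0
      induction cs with
      | nil => rfl
      | cons a cs ih =>
          rw [List.foldl_cons, this a (by simp)]
          have hadd : PySem.Set.add [c] c = [c] := by simp [PySem.Set.add]
          rw [hadd]
          exact ih (fun a ha => this a (by simp [ha]))
    rw [hconst]
    rfl

-- B's all-users-singleton test says exactly: each value has a unique user (= pvGood)
theorem pvSingleton_iff_good (p : List (String × String)) :
    (∀ v ∈ p.map Prod.fst,
        (PySem.Set.ofList ((p.filter (fun q => q.1 == v)).map Prod.snd)).length = 1)
      ↔ pvGood p := by
  constructor
  · intro h q hq
    have hv : q.1 ∈ p.map Prod.fst := List.mem_map_of_mem hq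
    obtain ⟨hne, hall⟩ := (pvOfList_length_one_iff _).1 (h q.1 hv)
    have hsome := pvFu_isSome_of_mem p q.1 hv
    unfold pvFu at hsome ⊢
    rw [Option.isSome_map] at hsome
    obtain ⟨r, hr⟩ := Option.isSome_iff_exists.1 hsome
    have hrp : r ∈ p := List.mem_of_find?_eq_some hr
    have hr1 : (r.1 == q.1) = true := by
      have h3 := List.find?_some hr
      simpa using h3
    have hrf : r.2 ∈ (p.filter (fun y => y.1 == q.1)).map Prod.snd :=
      List.mem_map_of_mem (List.mem_filter.2 ⟨hrp, hr1⟩)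
    have hqf : q.2 ∈ (p.filter (fun y => y.1 == q.1)).map Prod.snd :=
      List.mem_map_of_mem (List.mem_filter.2 ⟨hq, by simp⟩)
    rw [hr]
    simp only [Option.map_some]
    exact congrArg some (hall r.2 hrf q.2 hqf)
  · intro hg v hv
    rw [pvOfList_length_one_iff]
    obtain ⟨q, hq, hq1⟩ := List.mem_map.1 hv
    constructor
    · intro hnil
      have : q.2 ∈ (p.filter (fun y => y.1 == v)).map Prod.snd :=
        List.mem_map_of_mem (List.mem_filter.2 ⟨hq, by simp [hq1]⟩)
      rw [hnil] at this
      simp at this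
    · intro a ha b hb
      obtain ⟨qa, hqa, rfl⟩ := List.mem_map.1 ha
      obtain ⟨qb, hqb, rfl⟩ := List.mem_map.1 hb
      have hqa2 := List.mem_filter.1 hqa
      have hqb2 := List.mem_filter.1 hqb
      have h1 := hg qa hqa2.1
      have h2 := hg qb hqb2.1
      rw [eq_of_beq hqa2.2] at h1
      rw [eq_of_beq hqb2.2] at h2
      rw [h1] at h2
      exact Option.some_inj.1 h2

-- A's constant flag says exactly: one distinct value
theorem pvConstant_iff (x : String × String) (t : List (String × String)) :
    ((x :: t).all (fun q => q.1 == x.1) = true) ↔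
      (PySem.Set.ofList ((x :: t).map Prod.fst)).length = 1 := by
  rw [pvOfList_length_one_iff]
  constructor
  · intro h
    refine ⟨by simp, ?_⟩
    intro a ha b hb
    obtain ⟨qa, hqa, rfl⟩ := List.mem_map.1 ha
    obtain ⟨qb, hqb, rfl⟩ := List.mem_map.1 hb
    have h1 := eq_of_beq (List.all_eq_true.1 h qa hqa)
    have h2 := eq_of_beq (List.all_eq_true.1 h qb hqb)
    rw [h1, h2]
  · rintro ⟨-, hall⟩
    rw [List.all_eq_true]
    intro q hq
    exact beq_iff_eq.2 (hall q.1 (List.mem_map_of_mem hq) x.1 (by simp))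

-- ===== VERDICT (by name: the statement is the Claim_ definition above) =====
theorem infer_semantic_type_spec : Claim_equal_infer_semantic_type := by
  intro tuples _ _
  unfold Spec_infer_semantic_type
  cases tuples with
  | nil => rfl
  | cons t ts =>
      have hget : PySem.List.pyGet? (t :: ts) 0 = some t := by
        simp [PySem.List.pyGet?, PySem.List.pyIdx?]
      simp only [infer_semantic_type, infer_semantic_type_alt, hget, List.length_cons,
        Option.getD_some, Nat.succ_ne_zero, if_false]
      set f := ((t.lookup "value").getD "") with hf
      set p := (t :: ts).map pvPair with hp
      have hfoldA : (t :: ts).foldl (pvStepA f)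
          ⟨PySem.Dict.empty, 0, PySem.Set.empty, true⟩ =
          p.foldl (pvStep f) ⟨PySem.Dict.empty, 0, PySem.Set.empty, true⟩ := by
        rw [hp, List.foldl_map]
        rfl
      have hfoldB : (t :: ts).foldl
          (fun (d : PySem.Dict String (PySem.Set String)) item =>
            d.modify ((item.lookup "value").getD "") PySem.Set.empty
              (fun s => PySem.Set.add s ((item.lookup "user").getD "")))
          PySem.Dict.empty = p.foldl pvStepB PySem.Dict.empty := by
        rw [hp, List.foldl_map]
        rfl
      rw [hfoldA, hfoldB]
      -- the invariant of A's loop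
      have hbase : pvInvA f [] ⟨PySem.Dict.empty, 0, PySem.Set.empty, true⟩ := by
        refine ⟨rfl, rfl, ?_, 0, by simp, by simp [pvGood]⟩
        intro u v
        constructor
        · intro hc
          rw [PySem.Dict.getD_empty] at hc
          simp [PySem.Set.contains, PySem.Set.empty] at hc
        · intro hfu
          simp [pvFu] at hfu
      have hinv : pvInvA f p (p.foldl (pvStep f) ⟨PySem.Dict.empty, 0, PySem.Set.empty, true⟩) := by
        have h2 := pvInvA_foldl f p [] ⟨PySem.Dict.empty, 0, PySem.Set.empty, true⟩ hbase
        simpa using h2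
      obtain ⟨hA, hC, hV, b, hP, hG⟩ := hinv
      -- B's dict
      have hnodup := pvDB_nodup_keys p
      have hkeys := pvDB_keys p
      have hgetD : ∀ v, (p.foldl pvStepB PySem.Dict.empty).getD v PySem.Set.empty =
          PySem.Set.ofList ((p.filter (fun q => q.1 == v)).map Prod.snd) := by
        intro v
        rw [pvDB_getD, PySem.Dict.getD_empty, PySem.Set.ofList_eq_foldl]
        rfl
      have hsize : (p.foldl pvStepB PySem.Dict.empty).size
          = (PySem.Set.ofList (p.map Prod.fst)).length := by
        have h2 : (p.foldl pvStepB PySem.Dict.empty).size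
            = (p.foldl pvStepB PySem.Dict.empty).keys.length := by
          simp [PySem.Dict.size, PySem.Dict.keys]
        rw [h2, hkeys]
      have hallB : ((p.foldl pvStepB PySem.Dict.empty).values.all
          (fun users => PySem.Set.len users == 1)) = true ↔ pvGood p := by
        rw [PySem.Dict.values_eq_map_keys _ hnodup PySem.Set.empty, List.all_map, hkeys]
        rw [List.all_eq_true]
        rw [← pvSingleton_iff_good]
        constructor
        · intro h v hv
          have h2 := h v ((PySem.Set.mem_ofList _ _).2 hv)
          simp only [Function.comp, hgetD v, beq_iff_eq, PySem.Set.len] at h2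
          exact_mod_cast h2
        · intro h v hv
          have h2 := h v ((PySem.Set.mem_ofList _ _).1 hv)
          simp only [Function.comp, hgetD v, beq_iff_eq, PySem.Set.len]
          exact_mod_cast h2
      -- the head pair
      have hhead : p = pvPair t :: ts.map pvPair := by simp [hp]
      have hfp : f = (pvPair t).1 := rfl
      have hlen : p.length = ts.length + 1 := by simp [hp]
      -- the four aggregate facts
      have hconst : (p.foldl (pvStep f) ⟨PySem.Dict.empty, 0, PySem.Set.empty, true⟩).constant = true
          ↔ (PySem.Set.ofList (p.map Prod.fst)).length = 1 := by
        rw [hC, hhead, hfp]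
        exact pvConstant_iff (pvPair t) (ts.map pvPair)
      set st := p.foldl (pvStep f) ⟨PySem.Dict.empty, 0, PySem.Set.empty, true⟩ with hst
      set dcount := (PySem.Set.ofList (p.map Prod.fst)).length with hd
      set n := ts.length + 1 with hn
      have hlenAV : PySem.Set.len st.allValues = (dcount : Int) := by
        rw [hA, PySem.Set.len]
      by_cases h1 : dcount = 1
      · rw [if_pos (hconst.2 h1), if_pos (by rw [hsize]; exact h1)]
      · rw [if_neg (fun hcc => h1 (hconst.1 hcc))]
        by_cases h2 : dcount = n
        · rw [if_pos (by rw [hlenAV, h2]), if_neg (by rw [hsize]; exact h1),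
            if_pos (by rw [hsize]; exact h2)]
        · rw [if_neg (by rw [hlenAV]; intro hcc; exact h2 (by exact_mod_cast hcc))]
          by_cases h3 : pvGood p
          · rw [if_pos (by rw [hlenAV, hP, hG.2 h3, hlen, hn]; push_cast; ring),
              if_neg (by rw [hsize]; exact h1), if_neg (by rw [hsize]; exact h2),
              if_pos (hallB.2 h3)]
          · rw [if_neg ?_, if_neg (by rw [hsize]; exact h1), if_neg (by rw [hsize]; exact h2),
              if_neg (fun hcc => h3 (hallB.1 hcc))]
            rw [hlenAV, hP, hlen]
            intro hcc
            push_cast at hcc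
            exact h3 (hG.1 (by omega))
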